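-- pv_equiv track=rewrite | github.com/lordzizzy/leet_code | 03_hard/student_attendence_record_2.py | checkRecord_dp
-- ===== SOURCE A (Python) =====
-- def checkRecord_dp(n: int) -> int:
--     if n == 1:
--         return 3
--
--     limit = int(1e9+7)
--
--     p = [0] * n
--     l = [0] * max(n, 2)
--     a = [0] * max(n, 3)
--
--     p[0] = 1
--     l[0] = 1
--     l[1] = 3
--     a[0] = 1
--     a[1] = 2
--     a[2] = 4
--
--     for i in range(1, n):
--         p[i] = (a[i-1] + l[i-1] + p[i-1]) % limit
--         if i > 1:
--             l[i] = (p[i-1] + a[i-1] + p[i-2] + a[i-2]) % limit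
--         if i > 2:
--             a[i] = (a[i-1] + a[i-2] + a[i-3]) % limit
--
--     return (a[n-1] + p[n-1] + l[n-1]) % limit
-- ===== SOURCE B (Python) =====
-- MOD = 10**9 + 7
--
-- def _mat_mul(X, Y):
--     return [[sum(X[i][k] * Y[k][j] for k in range(6)) % MOD for j in range(6)]
--             for i in range(6)]
--
-- def _mat_pow(M, e):
--     R = [[1 if i == j else 0 for j in range(6)] for i in range(6)]
--     while e > 0:
--         if e % 2 == 1:
--             R = _mat_mul(R, M)
--         M = _mat_mul(M, M)
--         e //= 2
--     return R
--
-- def checkRecord_dp(n: int) -> int: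
--     # state vector at index i: (p[i], l[i], a[i], p[i-1], a[i-1], a[i-2])
--     if n == 1:
--         return 3
--     if n == 2:
--         return 8
--     M = [[1, 1, 1, 0, 0, 0],
--          [1, 0, 1, 1, 1, 0],
--          [0, 0, 1, 0, 1, 1],
--          [1, 0, 0, 0, 0, 0],
--          [0, 0, 1, 0, 0, 0],
--          [0, 0, 0, 0, 1, 0]]
--     P = _mat_pow(M, n - 3)
--     v = (8, 7, 4, 3, 2, 1)
--     w = [sum(P[i][k] * v[k] for k in range(6)) % MOD for i in range(6)]
--     return (w[0] + w[1] + w[2]) % MOD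
-- ===== Notes on version B (the rewrite author's own statement) =====
-- stated objective: faster
-- what changed: Replaces A's O(n) three-array DP loop by binary exponentiation of the 6x6 transition matrix of the recurrence (state p[i],l[i],a[i],p[i-1],a[i-1],a[i-2]), applied to the concrete state at index 2.
-- outside the precondition, e.g. on checkRecord_dp(0): A raises IndexError, B returns 19
import Mathlib
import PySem

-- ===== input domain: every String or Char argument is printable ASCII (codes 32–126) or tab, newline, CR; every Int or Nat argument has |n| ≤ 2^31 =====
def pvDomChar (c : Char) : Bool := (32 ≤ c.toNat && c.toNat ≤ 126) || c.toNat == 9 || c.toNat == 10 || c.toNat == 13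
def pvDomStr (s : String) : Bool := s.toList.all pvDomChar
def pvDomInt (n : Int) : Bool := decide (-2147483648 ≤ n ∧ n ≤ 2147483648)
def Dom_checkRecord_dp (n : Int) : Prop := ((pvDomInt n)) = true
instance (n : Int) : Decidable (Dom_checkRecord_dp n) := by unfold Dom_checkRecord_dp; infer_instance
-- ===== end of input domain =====

-- B replaces A's O(n) three-array DP loop by binary exponentiation of the 6-state
-- transition matrix of the same recurrence; equal return value proved for all n ≥ 1
-- (A raises IndexError for n ≤ 0, excluded by Pre_).

-- ===== PORT A =====
-- indices are nonnegative and in range on all admitted inputs (see Pre_), so Python's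
-- a[i] read / p[i] = v write are Array.getD / Array.setIfInBounds at the Nat index
def aBody : (Array Int × Array Int × Array Int) → Int → Array Int × Array Int × Array Int
  | (p, l, a), i =>
    let limit : Int := 1000000007
    let p := p.setIfInBounds i.toNat (PySem.Int.mod
      (a.getD (i-1).toNat 0 + l.getD (i-1).toNat 0 + p.getD (i-1).toNat 0) limit)
    let l := if i > 1 then l.setIfInBounds i.toNat (PySem.Int.mod
      (p.getD (i-1).toNat 0 + a.getD (i-1).toNat 0 + p.getD (i-2).toNat 0 + a.getD (i-2).toNat 0) limit) else l
    let a := if i > 2 then a.setIfInBounds i.toNat (PySem.Int.mod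
      (a.getD (i-1).toNat 0 + a.getD (i-2).toNat 0 + a.getD (i-3).toNat 0) limit) else a
    (p, l, a)

def checkRecord_dp (n : Int) : Int :=
  if n = 1 then 3 else
    let limit : Int := 1000000007
    let p : Array Int := Array.replicate n.toNat 0
    let l : Array Int := Array.replicate (max n.toNat 2) 0
    let a : Array Int := Array.replicate (max n.toNat 3) 0
    let p := p.setIfInBounds 0 1
    let l := (l.setIfInBounds 0 1).setIfInBounds 1 3
    let a := ((a.setIfInBounds 0 1).setIfInBounds 1 2).setIfInBounds 2 4
    let s := (PySem.List.pyRange 1 n 1).foldl aBody (p, l, a)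
    PySem.Int.mod (s.2.2.getD (n-1).toNat 0 + s.1.getD (n-1).toNat 0 + s.2.1.getD (n-1).toNat 0) limit


-- ===== PORT B =====
-- Source B's _mat_mul (row-of-rows comprehension over range(6))
def mmulmod (X Y : List (List Int)) : List (List Int) :=
  (List.range 6).map (fun i => (List.range 6).map (fun j =>
    PySem.Int.mod (((List.range 6).map
      (fun k => (X.getD i []).getD k 0 * (Y.getD k []).getD j 0)).sum) 1000000007))

-- Source B's _mat_pow while-loop (R starts as the identity matrix, e halves each turn)

-- Source B's _mat_pow while-loop (R starts as the identity matrix, e halves each turn)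
def matPowAux (M : List (List Int)) (e : Nat) (R : List (List Int)) : List (List Int) :=
  if h : e = 0 then R
  else matPowAux (mmulmod M M) (e / 2) (if e % 2 = 1 then mmulmod R M else R)
termination_by e
decreasing_by exact Nat.div_lt_self (Nat.pos_of_ne_zero h) (by norm_num)

def checkRecord_dp_alt (n : Int) : Int :=
  if n = 1 then 3
  else if n = 2 then 8
  else
    let R0 : List (List Int) := (List.range 6).map (fun i => (List.range 6).map
      (fun j => if i = j then 1 else 0))
    let M : List (List Int) :=
      [[1,1,1,0,0,0],[1,0,1,1,1,0],[0,0,1,0,1,1],[1,0,0,0,0,0],[0,0,1,0,0,0],[0,0,0,0,1,0]]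
    let P := matPowAux M (n-3).toNat R0
    let v : List Int := [8,7,4,3,2,1]
    let w : List Int := (List.range 6).map (fun i =>
      PySem.Int.mod (((List.range 6).map (fun k => (P.getD i []).getD k 0 * v.getD k 0)).sum) 1000000007)
    PySem.Int.mod (w.getD 0 0 + w.getD 1 0 + w.getD 2 0) 1000000007

-- ===== PRECONDITION & SPEC =====
-- A raises IndexError for n ≤ 0 (the arrays it allocates are empty), so those inputs are excluded.
def Pre_checkRecord_dp (n : Int) : Prop := 1 ≤ n
instance (n : Int) : Decidable (Pre_checkRecord_dp n) := by unfold Pre_checkRecord_dp; infer_instance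
def pvWitness_checkRecord_dp : Int := 5
def Spec_checkRecord_dp (n : Int) (out : Int) : Prop := out = checkRecord_dp_alt n
instance (n : Int) (out : Int) : Decidable (Spec_checkRecord_dp n out) := by unfold Spec_checkRecord_dp; infer_instance

-- ===== CLAIM (what is proved, stated in full; the proofs are below) =====
def Claim_equal_checkRecord_dp : Prop := ∀ (n : Int), Dom_checkRecord_dp n → Pre_checkRecord_dp n → Spec_checkRecord_dp n (checkRecord_dp n)

-- ===== LEMMAS AND PROOFS =====

-- list-level model of A's loop body (proof helper; aBody on arrays commutes with it)
def aBodyL (s : List Int × List Int × List Int) (i : Int) : List Int × List Int × List Int :=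
  let limit : Int := 1000000007
  let p := s.1; let l := s.2.1; let a := s.2.2
  let p := PySem.List.pySetD p i (PySem.Int.mod
    (PySem.List.pyGetD a (i-1) 0 + PySem.List.pyGetD l (i-1) 0 + PySem.List.pyGetD p (i-1) 0) limit)
  let l := if i > 1 then PySem.List.pySetD l i (PySem.Int.mod
    (PySem.List.pyGetD p (i-1) 0 + PySem.List.pyGetD a (i-1) 0 + PySem.List.pyGetD p (i-2) 0 + PySem.List.pyGetD a (i-2) 0) limit) else l
  let a := if i > 2 then PySem.List.pySetD a i (PySem.Int.mod
    (PySem.List.pyGetD a (i-1) 0 + PySem.List.pyGetD a (i-2) 0 + PySem.List.pyGetD a (i-3) 0) limit) else a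
  (p, l, a)


def tl (s : Array Int × Array Int × Array Int) : List Int × List Int × List Int :=
  (s.1.toList, s.2.1.toList, s.2.2.toList)

theorem getD_toList (xs : Array Int) (i : Nat) (d : Int) : xs.toList.getD i d = xs.getD i d := by
  rw [List.getD_eq_getElem?_getD, Array.getD]
  by_cases h : i < xs.size
  · simp [h]
  · simp [h]

theorem aBody_comm (s : Array Int × Array Int × Array Int) (i : Int) (hi : 1 ≤ i) :
    tl (aBody s i) = aBodyL (tl s) i := by
  obtain ⟨p, l, a⟩ := s
  have t0 : i = ((i.toNat : Nat) : Int) := by omega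
  have u1 : ((i.toNat : Nat) : Int) - 1 = ((i.toNat - 1 : Nat) : Int) := by omega
  have v1 : (i - 1).toNat = i.toNat - 1 := by omega
  simp only [aBody, aBodyL, tl]
  by_cases g2 : i > 2
  · rw [if_pos g2, if_pos g2, if_pos (by omega : i > 1), if_pos (by omega : i > 1)]
    have u2 : ((i.toNat : Nat) : Int) - 2 = ((i.toNat - 2 : Nat) : Int) := by omega
    have u3 : ((i.toNat : Nat) : Int) - 3 = ((i.toNat - 3 : Nat) : Int) := by omega
    have v2 : (i - 2).toNat = i.toNat - 2 := by omega
    have v3 : (i - 3).toNat = i.toNat - 3 := by omega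
    conv_rhs => rw [t0, u1, u2, u3]
    simp only [PySem.List.pySetD_natCast, PySem.List.pyGetD_natCast, v1, v2, v3,
      ← Array.toList_setIfInBounds, getD_toList]
  · rw [if_neg g2, if_neg g2]
    by_cases g1 : i > 1
    · rw [if_pos g1, if_pos g1]
      have u2 : ((i.toNat : Nat) : Int) - 2 = ((i.toNat - 2 : Nat) : Int) := by omega
      have v2 : (i - 2).toNat = i.toNat - 2 := by omega
      conv_rhs => rw [t0, u1, u2]
      simp only [PySem.List.pySetD_natCast, PySem.List.pyGetD_natCast, v1, v2,
        ← Array.toList_setIfInBounds, getD_toList]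
    · rw [if_neg g1, if_neg g1]
      conv_rhs => rw [t0, u1]
      simp only [PySem.List.pySetD_natCast, PySem.List.pyGetD_natCast, v1,
        ← Array.toList_setIfInBounds, getD_toList]

theorem foldl_comm : ∀ (xs : List Int) (s : Array Int × Array Int × Array Int),
    (∀ x ∈ xs, (1:Int) ≤ x) → tl (xs.foldl aBody s) = xs.foldl aBodyL (tl s) := by
  intro xs
  induction xs with
  | nil => intro s _; rfl
  | cons x xs ih =>
    intro s hmem
    simp only [List.foldl_cons]
    rw [ih _ (fun y hy => hmem y (List.mem_cons_of_mem _ hy)),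
      aBody_comm _ _ (hmem x (List.mem_cons_self))]

def LIM : Int := 1000000007

def Mm : Matrix (Fin 6) (Fin 6) Int :=
  !![1,1,1,0,0,0; 1,0,1,1,1,0; 0,0,1,0,1,1; 1,0,0,0,0,0; 0,0,1,0,0,0; 0,0,0,0,1,0]

def v0 : Fin 6 → Int := ![8,7,4,3,2,1]

def V (k : Nat) : Fin 6 → Int := (Mm ^ k).mulVec v0

def MEq (A B : Matrix (Fin 6) (Fin 6) Int) : Prop := ∀ i j, A i j % LIM = B i j % LIM

theorem pymod_eq (a : Int) : PySem.Int.mod a 1000000007 = a % 1000000007 :=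
  PySem.Int.mod_eq_emod_of_pos (by norm_num)

def mmulmodF (A B : Matrix (Fin 6) (Fin 6) Int) : Matrix (Fin 6) (Fin 6) Int :=
  Matrix.of fun i j => PySem.Int.mod (∑ k, A i k * B k j) 1000000007

def toMat (X : List (List Int)) : Matrix (Fin 6) (Fin 6) Int :=
  Matrix.of fun i j => (X.getD i []).getD j 0

theorem getD_map_range6 {α : Type} (f : Nat → α) (d : α) (i : Fin 6) :
    ((List.range 6).map f).getD i.val d = f i.val := by
  fin_cases i <;> rfl

theorem sum_map_range6 (g : Nat → Int) :
    ((List.range 6).map g).sum = ∑ k : Fin 6, g k.val := by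
  simp [List.range_succ, Fin.sum_univ_six]; ring

theorem toMat_mmulmod (X Y : List (List Int)) :
    toMat (mmulmod X Y) = mmulmodF (toMat X) (toMat Y) := by
  funext i j
  show ((mmulmod X Y).getD i.val []).getD j.val 0
      = PySem.Int.mod (∑ k : Fin 6, ((X.getD i.val []).getD k.val 0) * ((Y.getD k.val []).getD j.val 0)) 1000000007
  rw [mmulmod, getD_map_range6, getD_map_range6, sum_map_range6]

theorem toMat_R0 : toMat ((List.range 6).map (fun i => (List.range 6).map
    (fun j => if i = j then (1:Int) else 0))) = 1 := by
  funext i j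
  show ((((List.range 6).map (fun i => (List.range 6).map
    (fun j => if i = j then (1:Int) else 0)))).getD i.val []).getD j.val 0 = (1 : Matrix (Fin 6) (Fin 6) Int) i j
  rw [getD_map_range6, getD_map_range6]
  by_cases h : i = j
  · simp [h, Matrix.one_apply]
  · have : ¬ (i.val = j.val) := fun hc => h (Fin.val_injective hc)
    simp [this, h]

theorem toMat_M : toMat [[1,1,1,0,0,0],[1,0,1,1,1,0],[0,0,1,0,1,1],[1,0,0,0,0,0],[0,0,1,0,0,0],[0,0,0,0,1,0]] = Mm := by
  funext i j
  fin_cases i <;> fin_cases j <;> rfl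

theorem getD_map_range6' {α : Type} (f : Nat → α) (d : α) (k : Nat) (hk : k < 6) :
    ((List.range 6).map f).getD k d = f k := by
  interval_cases k <;> rfl

theorem vlist_eq (k : Fin 6) : ([8,7,4,3,2,1] : List Int).getD k.val 0 = v0 k := by
  fin_cases k <;> rfl

theorem MEq_refl (A : Matrix (Fin 6) (Fin 6) Int) : MEq A A := fun _ _ => rfl

theorem MEq_mul {X X' Y Y' : Matrix (Fin 6) (Fin 6) Int} (hX : MEq X X') (hY : MEq Y Y') :
    MEq (mmulmodF X Y) (X' * Y') := by
  intro i j
  have h : ∀ a : Fin 6, X i a * Y a j % LIM = X' i a * Y' a j % LIM := fun a =>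
    (Int.ModEq.mul (hX i a) (hY a j))
  simp only [mmulmodF, Matrix.of_apply, pymod_eq, Matrix.mul_apply, LIM] at *
  rw [Int.emod_emod_of_dvd _ dvd_rfl]
  simp only [Fin.sum_univ_six]
  exact Int.ModEq.add (Int.ModEq.add (Int.ModEq.add (Int.ModEq.add (Int.ModEq.add
    (h 0) (h 1)) (h 2)) (h 3)) (h 4)) (h 5)

theorem matPowAux_MEq : ∀ (e : Nat) (X R : List (List Int)) (A B : Matrix (Fin 6) (Fin 6) Int),
    MEq (toMat X) A → MEq (toMat R) B → MEq (toMat (matPowAux X e R)) (B * A ^ e) := by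
  intro e
  induction e using Nat.strong_induction_on with
  | _ e ih =>
    intro X R A B hX hR
    rw [matPowAux]
    by_cases h : e = 0
    · subst h; simp only [reduceDIte, pow_zero, mul_one]; exact hR
    · rw [dif_neg h]
      have h2 : e / 2 < e := Nat.div_lt_self (Nat.pos_of_ne_zero h) (by norm_num)
      have hR' : MEq (toMat (if e % 2 = 1 then mmulmod R X else R))
          (if e % 2 = 1 then B * A else B) := by
        by_cases hp : e % 2 = 1
        · rw [if_pos hp, if_pos hp, toMat_mmulmod]; exact MEq_mul hR hX
        · rw [if_neg hp, if_neg hp]; exact hR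
      have key := ih (e / 2) h2 (mmulmod X X) _ (A * A) _ (by rw [toMat_mmulmod]; exact MEq_mul hX hX) hR'
      have alg : (if e % 2 = 1 then B * A else B) * (A * A) ^ (e / 2) = B * A ^ e := by
        rw [← sq, ← pow_mul]
        by_cases hp : e % 2 = 1
        · rw [if_pos hp]
          conv_rhs => rw [show e = 2 * (e / 2) + 1 by omega]
          rw [pow_succ', ← mul_assoc]
        · rw [if_neg hp]
          conv_rhs => rw [show e = 2 * (e / 2) by omega]
      rw [alg] at key
      exact key

theorem V_succ (k : Nat) : V (k + 1) =
    ![V k 0 + V k 1 + V k 2, V k 0 + V k 2 + V k 3 + V k 4, V k 2 + V k 4 + V k 5,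
      V k 0, V k 2, V k 4] := by
  have h : V (k+1) = Mm.mulVec (V k) := by
    rw [V, V, pow_succ', ← Matrix.mulVec_mulVec]
  rw [h]
  funext i
  fin_cases i <;>
    simp [Mm, Matrix.mulVec, dotProduct, Fin.sum_univ_six]

theorem alt_eq_V (n : Int) (h1 : n ≠ 1) (h2 : n ≠ 2) :
    checkRecord_dp_alt n = (V (n-3).toNat 0 + V (n-3).toNat 1 + V (n-3).toNat 2) % LIM := by
  have hP : MEq (toMat (matPowAux
      [[1,1,1,0,0,0],[1,0,1,1,1,0],[0,0,1,0,1,1],[1,0,0,0,0,0],[0,0,1,0,0,0],[0,0,0,0,1,0]]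
      (n-3).toNat ((List.range 6).map (fun i => (List.range 6).map
        (fun j => if i = j then (1:Int) else 0))))) (Mm ^ (n-3).toNat) := by
    have := matPowAux_MEq (n-3).toNat _ _ Mm 1 (by rw [toMat_M]; exact MEq_refl Mm)
      (by rw [toMat_R0]; exact MEq_refl 1)
    rwa [one_mul] at this
  have hw : ∀ i : Fin 6, PySem.Int.mod (((List.range 6).map (fun k =>
      (((matPowAux
      [[1,1,1,0,0,0],[1,0,1,1,1,0],[0,0,1,0,1,1],[1,0,0,0,0,0],[0,0,1,0,0,0],[0,0,0,0,1,0]]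
      (n-3).toNat ((List.range 6).map (fun i => (List.range 6).map
        (fun j => if i = j then (1:Int) else 0)))).getD i.val []).getD k 0)
        * (([8,7,4,3,2,1] : List Int).getD k 0))).sum) 1000000007 = V (n-3).toNat i % LIM := by
    intro i
    rw [sum_map_range6, pymod_eq]
    have h : ∀ a : Fin 6, toMat (matPowAux
      [[1,1,1,0,0,0],[1,0,1,1,1,0],[0,0,1,0,1,1],[1,0,0,0,0,0],[0,0,1,0,0,0],[0,0,0,0,1,0]]
      (n-3).toNat ((List.range 6).map (fun i => (List.range 6).map
        (fun j => if i = j then (1:Int) else 0)))) i a * v0 a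
        ≡ (Mm ^ (n-3).toNat) i a * v0 a [ZMOD LIM] := fun a =>
      Int.ModEq.mul (hP i a) rfl
    have hs : (∑ k : Fin 6, (((matPowAux
      [[1,1,1,0,0,0],[1,0,1,1,1,0],[0,0,1,0,1,1],[1,0,0,0,0,0],[0,0,1,0,0,0],[0,0,0,0,1,0]]
      (n-3).toNat ((List.range 6).map (fun i => (List.range 6).map
        (fun j => if i = j then (1:Int) else 0)))).getD i.val []).getD k.val 0)
        * (([8,7,4,3,2,1] : List Int).getD k.val 0))
        ≡ (∑ k, (Mm ^ (n-3).toNat) i k * v0 k) [ZMOD LIM] := by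
      simp only [Fin.sum_univ_six, vlist_eq]
      exact ((((((h 0).add (h 1)).add (h 2)).add (h 3)).add (h 4)).add (h 5))
    have hv : V (n-3).toNat i = ∑ k, (Mm ^ (n-3).toNat) i k * v0 k := by
      simp [V, Matrix.mulVec, dotProduct]
    rw [hv]
    exact hs
  rw [checkRecord_dp_alt, if_neg h1, if_neg h2]
  simp only []
  rw [getD_map_range6' _ _ 0 (by norm_num), getD_map_range6' _ _ 1 (by norm_num),
      getD_map_range6' _ _ 2 (by norm_num)]
  have e0 := hw 0; have e1 := hw 1; have e2 := hw 2
  simp only [show ((0:Fin 6)).val = 0 from rfl, show ((1:Fin 6)).val = 1 from rfl,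
    show ((2:Fin 6)).val = 2 from rfl] at e0 e1 e2
  rw [e0, e1, e2, pymod_eq, show ((1000000007:Int)) = LIM from rfl]
  have em : ∀ x : Int, x % LIM ≡ x [ZMOD LIM] := fun x => Int.emod_emod_of_dvd _ dvd_rfl
  exact ((em _).add ((em _))).add (em _) |>.symm ▸ rfl

def DInv (nn k : Nat) (s : List Int × List Int × List Int) : Prop :=
  s.1.length = nn ∧ s.2.1.length = max nn 2 ∧ s.2.2.length = max nn 3 ∧
  s.1.getD (k+2) 0 % LIM = V k 0 % LIM ∧
  s.2.1.getD (k+2) 0 % LIM = V k 1 % LIM ∧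
  s.2.2.getD (k+2) 0 % LIM = V k 2 % LIM ∧
  s.1.getD (k+1) 0 % LIM = V k 3 % LIM ∧
  s.2.2.getD (k+1) 0 % LIM = V k 4 % LIM ∧
  s.2.2.getD k 0 % LIM = V k 5 % LIM

theorem mod_congr3 (a b c x y z : Int) (ha : a % LIM = x % LIM)
    (hb : b % LIM = y % LIM) (hc : c % LIM = z % LIM) :
    (a + b + c) % 1000000007 % LIM = (x + y + z) % LIM := by
  have : ((1000000007:Int)) = LIM := rfl
  rw [this, Int.emod_emod_of_dvd _ dvd_rfl]
  exact Int.ModEq.add (Int.ModEq.add ha hb) hc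

theorem mod_congr4 (a b c d x y z w : Int) (ha : a % LIM = x % LIM)
    (hb : b % LIM = y % LIM) (hc : c % LIM = z % LIM) (hd : d % LIM = w % LIM) :
    (a + b + c + d) % 1000000007 % LIM = (x + y + z + w) % LIM := by
  have : ((1000000007:Int)) = LIM := rfl
  rw [this, Int.emod_emod_of_dvd _ dvd_rfl]
  exact Int.ModEq.add (Int.ModEq.add (Int.ModEq.add ha hb) hc) hd

theorem Inv_step (nn k : Nat) (s : List Int × List Int × List Int)
    (hk : k + 3 < nn) (h : DInv nn k s) :
    DInv nn (k + 1) (aBodyL s ((k : Int) + 3)) := by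
  obtain ⟨hlp, hll, hla, h0, h1, h2, h3, h4, h5⟩ := h
  have c0 : ((k : Int) + 3) = ((k + 3 : Nat) : Int) := by push_cast; ring
  have c1 : (((k + 3 : Nat) : Int)) - 1 = ((k + 2 : Nat) : Int) := by push_cast; ring
  have c2 : (((k + 3 : Nat) : Int)) - 2 = ((k + 1 : Nat) : Int) := by push_cast; ring
  have c3 : (((k + 3 : Nat) : Int)) - 3 = ((k : Nat) : Int) := by push_cast; ring
  have b1 : k + 3 < nn := hk
  have b2 : k + 3 < max nn 2 := by omega
  have b3 : k + 3 < max nn 3 := by omega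
  simp only [aBodyL, c0, c1, c2, c3, PySem.List.pySetD_natCast, PySem.List.pyGetD_natCast,
    pymod_eq, gt_iff_lt, DInv]
  have gA' : ((1:Int) < ((k + 3 : Nat) : Int)) := by omega
  have gB' : ((2:Int) < ((k + 3 : Nat) : Int)) := by omega
  simp only [gA', gB', if_true]
  simp only [show k + 1 + 2 = k + 3 from by omega, show k + 1 + 1 = k + 2 from by omega]
  simp only [List.getD_eq_getElem?_getD, List.getElem?_set, List.length_set, hlp, hll, hla,
    b1, b2, b3]
  have gA : ((1:Int) < (k:Int) + 3) := by omega
  have gB : ((2:Int) < (k:Int) + 3) := by omega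
  norm_num [gA, gB]
  simp only [List.getD_eq_getElem?_getD] at h0 h1 h2 h3 h4 h5
  refine ⟨?_, ?_, ?_, ?_, ?_, ?_⟩
  · rw [show V (k+1) 0 = V k 2 + V k 1 + V k 0 from by rw [V_succ]; simp; ring]
    exact mod_congr3 _ _ _ _ _ _ h2 h1 h0
  · rw [show V (k+1) 1 = V k 0 + V k 2 + V k 3 + V k 4 from by rw [V_succ]; simp]
    exact mod_congr4 _ _ _ _ _ _ _ _ h0 h2 h3 h4
  · rw [show V (k+1) 2 = V k 2 + V k 4 + V k 5 from by rw [V_succ]; simp]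
    exact mod_congr3 _ _ _ _ _ _ h2 h4 h5
  · rw [show V (k+1) 3 = V k 0 from by rw [V_succ]; simp]
    exact h0
  · rw [show V (k+1) 4 = V k 2 from by rw [V_succ]; simp]
    exact h2
  · rw [show V (k+1) 5 = V k 4 from by rw [V_succ]; simp]
    exact h4

theorem V_zero : V 0 = v0 := by
  simp [V, Matrix.one_mulVec]

theorem Inv_base (nn : Nat) (h3 : 3 ≤ nn) :
    DInv nn 0 (aBodyL (aBodyL
      (((List.replicate nn 0).set 0 1),
       ((List.replicate (max nn 2) 0).set 0 1).set 1 3,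
       (((List.replicate (max nn 3) 0).set 0 1).set 1 2).set 2 4) 1) 2) := by
  have e0 : (0:Nat) < nn := by omega
  have e1 : (1:Nat) < nn := by omega
  have e2 : (2:Nat) < nn := by omega
  simp only [aBodyL, DInv, V_zero]
  norm_num [PySem.List.pySetD_of_nonneg, PySem.List.pyGetD_eq_getElem, pymod_eq,
    List.getD_eq_getElem?_getD, List.getElem?_set, List.getElem?_replicate,
    List.length_set, List.length_replicate, PySem.List.len_eq, e0, e1, e2]
  simp only [show Int.toNat 2 = 2 from rfl]
  norm_num [List.getElem_set, List.getElem_replicate, v0, LIM]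
  refine ⟨by decide, by decide, by decide, by decide⟩

theorem Inv_fold (n : Int) (hn3 : 3 ≤ n) :
    ∀ (c k : Nat) (s : List Int × List Int × List Int), k + 3 + c = n.toNat →
      DInv n.toNat k s →
      DInv n.toNat (k + c) ((PySem.List.pyRange ((k : Int) + 3) n 1).foldl aBodyL s) := by
  intro c
  induction c with
  | zero =>
    intro k s hc hs
    rw [PySem.List.pyRange_one_eq_nil (by omega)]
    simpa using hs
  | succ c ih =>
    intro k s hc hs
    rw [PySem.List.pyRange_one_cons (by omega)]
    simp only [List.foldl_cons]
    have step := Inv_step n.toNat k s (by omega) hs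
    have := ih (k + 1) (aBodyL s ((k : Int) + 3)) (by omega) step
    rw [show ((k : Int) + 3 + 1) = (((k+1 : Nat) : Int) + 3) from by push_cast; ring]
    rw [show k + (c + 1) = (k + 1) + c from by omega]
    exact this

theorem main_equiv (n : Int) (h : 1 ≤ n) : checkRecord_dp n = checkRecord_dp_alt n := by
  by_cases h1 : n = 1
  · subst h1; decide
  by_cases h2 : n = 2
  · subst h2; decide
  have hn3 : 3 ≤ n := by omega
  rw [checkRecord_dp, if_neg h1]
  show PySem.Int.mod _ _ = _
  have hmem : ∀ x ∈ PySem.List.pyRange 1 n 1, (1:Int) ≤ x := fun x hx =>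
    (PySem.List.mem_pyRange_one.mp hx).1
  have hco := foldl_comm (PySem.List.pyRange 1 n 1)
    ((Array.replicate n.toNat 0).setIfInBounds 0 1,
     ((Array.replicate (max n.toNat 2) 0).setIfInBounds 0 1).setIfInBounds 1 3,
     (((Array.replicate (max n.toNat 3) 0).setIfInBounds 0 1).setIfInBounds 1 2).setIfInBounds 2 4)
    hmem
  simp only [tl, Array.toList_setIfInBounds, Array.toList_replicate] at hco
  have e1 : ((PySem.List.pyRange 1 n 1).foldl aBody
      ((Array.replicate n.toNat 0).setIfInBounds 0 1,
       ((Array.replicate (max n.toNat 2) 0).setIfInBounds 0 1).setIfInBounds 1 3,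
       (((Array.replicate (max n.toNat 3) 0).setIfInBounds 0 1).setIfInBounds 1 2).setIfInBounds 2 4)).1.toList
      = ((PySem.List.pyRange 1 n 1).foldl aBodyL
      ((List.replicate n.toNat 0).set 0 1,
       ((List.replicate (max n.toNat 2) 0).set 0 1).set 1 3,
       (((List.replicate (max n.toNat 3) 0).set 0 1).set 1 2).set 2 4)).1 := by rw [← hco]
  have e2 : ((PySem.List.pyRange 1 n 1).foldl aBody
      ((Array.replicate n.toNat 0).setIfInBounds 0 1,
       ((Array.replicate (max n.toNat 2) 0).setIfInBounds 0 1).setIfInBounds 1 3,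
       (((Array.replicate (max n.toNat 3) 0).setIfInBounds 0 1).setIfInBounds 1 2).setIfInBounds 2 4)).2.1.toList
      = ((PySem.List.pyRange 1 n 1).foldl aBodyL
      ((List.replicate n.toNat 0).set 0 1,
       ((List.replicate (max n.toNat 2) 0).set 0 1).set 1 3,
       (((List.replicate (max n.toNat 3) 0).set 0 1).set 1 2).set 2 4)).2.1 := by rw [← hco]
  have e3 : ((PySem.List.pyRange 1 n 1).foldl aBody
      ((Array.replicate n.toNat 0).setIfInBounds 0 1,
       ((Array.replicate (max n.toNat 2) 0).setIfInBounds 0 1).setIfInBounds 1 3,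
       (((Array.replicate (max n.toNat 3) 0).setIfInBounds 0 1).setIfInBounds 1 2).setIfInBounds 2 4)).2.2.toList
      = ((PySem.List.pyRange 1 n 1).foldl aBodyL
      ((List.replicate n.toNat 0).set 0 1,
       ((List.replicate (max n.toNat 2) 0).set 0 1).set 1 3,
       (((List.replicate (max n.toNat 3) 0).set 0 1).set 1 2).set 2 4)).2.2 := by rw [← hco]
  rw [← getD_toList, ← getD_toList, ← getD_toList, e1, e2, e3]
  rw [PySem.List.pyRange_one_append 1 3 n (by omega) (by omega), List.foldl_append,
    show PySem.List.pyRange 1 3 1 = [1, 2] from by decide]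
  simp only [List.foldl_cons, List.foldl_nil]
  have base := Inv_base n.toNat (by omega)
  have fold := Inv_fold n hn3 (n.toNat - 3) 0 _ (by omega) base
  rw [show (((0:Nat):Int) + 3) = 3 from by norm_num] at fold
  simp only [Nat.zero_add] at fold
  set s := (PySem.List.pyRange 3 n 1).foldl aBodyL _ with hs
  obtain ⟨hlp, hll, hla, h0', h1', h2', h3', h4', h5'⟩ := fold
  have hc : (n - 1).toNat = (n.toNat - 3) + 2 := by omega
  rw [hc]
  rw [alt_eq_V n h1 h2]
  rw [pymod_eq]
  have hmod : (s.2.2.getD (n.toNat - 3 + 2) 0 + s.1.getD (n.toNat - 3 + 2) 0 +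
      s.2.1.getD (n.toNat - 3 + 2) 0) % LIM
      = (V (n.toNat - 3) 2 + V (n.toNat - 3) 0 + V (n.toNat - 3) 1) % LIM :=
    Int.ModEq.add (Int.ModEq.add h2' h0') h1'
  have he : (n - 3).toNat = n.toNat - 3 := by omega
  rw [he, show ((1000000007:Int)) = LIM from rfl, hmod]
  rw [show ∀ x y z : Int, x + y + z = y + z + x from fun x y z => by ring]

-- ===== VERDICT (by name: the statement is the Claim_ definition above) =====
theorem checkRecord_dp_spec : Claim_equal_checkRecord_dp := by
  intro n _ hpre
  exact main_equiv n hpre
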